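-- pv_equiv track=rewrite | github.com/Paulander/recon-lite | src/recon_lite/learning/sweep_engine.py | _compute_max_depth
-- ===== SOURCE A (Python) =====
-- from typing import Any, Dict, List, Optional, Tuple
--
-- def _compute_max_depth(
--
--     nodes: Dict[str, Any],
--     edges: Dict[str, Any],
--     backbone_nodes: set,
-- ) -> int:
--     """Compute maximum depth from backbone."""
--     # Build parent map
--     parent_map = {}
--     for edge_key, edge_data in edges.items():
--         if edge_data.get("type") == "SUB":
--             src = edge_data.get("src", "")
--             dst = edge_data.get("dst", "")
--             parent_map[dst] = src
--
--     max_depth = 0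
--     for node_id in nodes:
--         depth = 0
--         current = node_id
--         visited = set()
--
--         while current and current not in backbone_nodes and current not in visited:
--             visited.add(current)
--             parent = parent_map.get(current)
--             if parent:
--                 depth += 1
--                 current = parent
--             else:
--                 break
--
--         max_depth = max(max_depth, depth)
--
--     return max_depth
-- ===== SOURCE B (Python) =====
-- def _compute_max_depth(
--     nodes,
--     edges,
--     backbone_nodes,
-- ):
--     """Compute maximum depth from backbone (memoized: each node's chain is walked once)."""
--     parent_map = {
--         ed.get("dst", ""): ed.get("src", "")
--         for ed in edges.values()
--         if ed.get("type") == "SUB"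
--     }
--
--     memo = {}  # node -> its walk depth, shared across all starts
--     max_depth = 0
--     for start in nodes:
--         path = []          # nodes pushed on the current walk, in order
--         pos = {}           # node -> its index in path
--         cur = start
--         while True:
--             if not cur or cur in backbone_nodes:
--                 base = 0
--                 break
--             if cur in memo:
--                 base = memo[cur]
--                 break
--             if cur in pos:  # closed a cycle: every cycle node's walk has length = cycle size
--                 i = pos[cur]
--                 base = len(path) - i
--                 for n in path[i:]:
--                     memo[n] = base
--                 path = path[:i]
--                 break
--             parent = parent_map.get(cur)
--             if not parent:
--                 memo[cur] = 0
--                 base = 0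
--                 break
--             pos[cur] = len(path)
--             path.append(cur)
--             cur = parent
--         d = base
--         for n in reversed(path):  # unwind the tail: one step deeper each
--             d += 1
--             memo[n] = d
--         if d > max_depth:
--             max_depth = d
--     return max_depth
-- ===== Notes on version B (the rewrite author's own statement) =====
-- stated objective: alternative
-- what changed: B memoizes each node's walk depth across start nodes (cycle nodes all get the cycle length, the tail unwinds as 1+child), so every parent chain is traversed once instead of being re-walked for every start node.
import Mathlib
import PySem

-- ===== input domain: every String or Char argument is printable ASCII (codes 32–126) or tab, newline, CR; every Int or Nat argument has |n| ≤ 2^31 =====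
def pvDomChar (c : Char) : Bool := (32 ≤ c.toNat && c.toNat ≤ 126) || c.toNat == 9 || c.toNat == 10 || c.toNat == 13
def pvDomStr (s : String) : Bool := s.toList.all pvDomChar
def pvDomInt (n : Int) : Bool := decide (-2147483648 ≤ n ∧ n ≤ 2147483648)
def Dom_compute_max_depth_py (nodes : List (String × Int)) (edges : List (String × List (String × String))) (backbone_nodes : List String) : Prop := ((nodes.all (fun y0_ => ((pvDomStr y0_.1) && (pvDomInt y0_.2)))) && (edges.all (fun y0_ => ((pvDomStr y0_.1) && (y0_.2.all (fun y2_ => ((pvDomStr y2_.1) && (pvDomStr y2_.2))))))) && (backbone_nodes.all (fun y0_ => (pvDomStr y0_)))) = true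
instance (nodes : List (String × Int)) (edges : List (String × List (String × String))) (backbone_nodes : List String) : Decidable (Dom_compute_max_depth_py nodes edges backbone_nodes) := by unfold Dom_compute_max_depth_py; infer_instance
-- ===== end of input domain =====

-- B replaces A's per-start re-walk of the whole parent chain by a shared memo of every node's
-- walk depth, so each chain is traversed once; the return values are proved equal.

-- Termination helper (cited by the ports' `decreasing_by`): marking one more key shrinks the
-- count of unmarked parent-map keys.
theorem pvFilterLt (keys : List String) (pb pa : String → Bool) (c : String)
    (hc : c ∈ keys) (hcb : pb c = true) (hca : pa c = false)
    (himp : ∀ x, pa x = true → pb x = true) :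
    (keys.filter pa).length < (keys.filter pb).length := by
  have hsub : (keys.filter pa).Sublist (keys.filter pb) :=
    List.monotone_filter_right _ himp
  rcases Nat.lt_or_ge (keys.filter pa).length (keys.filter pb).length with h | h
  · exact h
  · exfalso
    have heq : keys.filter pa = keys.filter pb :=
      hsub.eq_of_length (Nat.le_antisymm hsub.length_le h)
    have hmem : c ∈ keys.filter pb := List.mem_filter.mpr ⟨hc, hcb⟩
    rw [← heq] at hmem
    have := (List.mem_filter.mp hmem).2
    rw [hca] at this
    exact Bool.false_ne_true this

-- ===== PORT A =====

-- `parent_map`: for edge_data with .get("type") == "SUB", parent_map[dst] = src.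
def pvPmA (edges : List (String × List (String × String))) : PySem.Dict String String :=
  edges.foldl (fun pm e =>
    if (PySem.Dict.mk e.2).get? "type" = some "SUB" then
      pm.insert ((PySem.Dict.mk e.2).getD "dst" "") ((PySem.Dict.mk e.2).getD "src" "")
    else pm) PySem.Dict.empty

-- A's inner while loop: visited set, running depth counter.
def pvWalkA (bb : List String) (pm : PySem.Dict String String)
    (visited : PySem.Set String) (depth : Int) (cur : String) : Int :=
  if h : cur ≠ "" ∧ cur ∉ bb ∧ cur ∉ visited then
    match hpm : pm.get? cur with
    | some p =>
        if p ≠ "" then pvWalkA bb pm (PySem.Set.add visited cur) (depth + 1) p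
        else depth
    | none => depth
  else depth
termination_by (pm.keys.filter (fun k => !(PySem.Set.contains visited k))).length
decreasing_by
  apply pvFilterLt (c := cur)
  · exact (PySem.Dict.contains_iff_mem_keys pm cur).mp
      (by rw [PySem.Dict.contains_eq_isSome_get?, hpm]; rfl)
  · simp only [Bool.not_eq_eq_eq_not, Bool.not_true]
    exact Bool.eq_false_iff.mpr (fun hc => h.2.2 ((PySem.Set.contains_iff _ _).mp hc))
  · have : (PySem.Set.add visited cur).contains cur = true :=
      (PySem.Set.contains_iff _ _).mpr ((PySem.Set.mem_add _ _ _).mpr (Or.inr rfl))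
    rw [this]; rfl
  · intro x hx
    simp only [Bool.not_eq_eq_eq_not, Bool.not_true] at hx ⊢
    refine Bool.eq_false_iff.mpr (fun hc => ?_)
    have hmem : x ∈ visited := (PySem.Set.contains_iff _ _).mp hc
    have : (PySem.Set.add visited cur).contains x = true :=
      (PySem.Set.contains_iff _ _).mpr ((PySem.Set.mem_add _ _ _).mpr (Or.inl hmem))
    rw [this] at hx; exact Bool.false_ne_true hx.symm

def compute_max_depth_py (nodes : List (String × Int)) (edges : List (String × List (String × String))) (backbone_nodes : List String) : Int :=
  let pm := pvPmA edges
  nodes.foldl (fun md p => max md (pvWalkA backbone_nodes pm PySem.Set.empty 0 p.1)) 0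

-- ===== PORT B =====

-- `parent_map` built by Source B's dict comprehension (filter, then insert per kept edge dict).
def pvPmB (edges : List (String × List (String × String))) : PySem.Dict String String :=
  (((edges.map (fun e => PySem.Dict.mk e.2)).filter
      (fun ed => ed.get? "type" == some "SUB"))).foldl
    (fun pm ed => pm.insert (ed.getD "dst" "") (ed.getD "src" "")) PySem.Dict.empty

-- Source B's phase-1 loop: follow parents pushing the path, stop on backbone/empty, memo hit,
-- cycle closure (memoize the whole cycle at the cycle length) or missing parent.
-- Returns (base, path, memo).
def pvWalkB (bb : List String) (pm : PySem.Dict String String)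
    (memo : PySem.Dict String Int) (pos : PySem.Dict String Int)
    (path : List String) (cur : String) : Int × List String × PySem.Dict String Int :=
  if cur = "" ∨ cur ∈ bb then (0, path, memo)
  else
    match memo.get? cur with
    | some b => (b, path, memo)
    | none =>
      match hpos : pos.get? cur with
      | some i =>
          let base : Int := (path.length : Int) - i
          (base, PySem.List.slice path none (some i),
            (PySem.List.slice path (some i) none).foldl (fun m n => m.insert n base) memo)
      | none =>
        match hpm : pm.get? cur with
        | some p =>
            if p ≠ "" then
              pvWalkB bb pm memo (pos.insert cur (path.length : Int)) (path ++ [cur]) p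
            else (0, path, memo.insert cur 0)
        | none => (0, path, memo.insert cur 0)
termination_by (pm.keys.filter (fun k => !(pos.contains k))).length
decreasing_by
  apply pvFilterLt (c := cur)
  · exact (PySem.Dict.contains_iff_mem_keys pm cur).mp
      (by rw [PySem.Dict.contains_eq_isSome_get?, hpm]; rfl)
  · rw [PySem.Dict.contains_eq_isSome_get?, hpos]; rfl
  · rw [PySem.Dict.contains_eq_isSome_get?, PySem.Dict.get?_insert_self]; rfl
  · intro x hx
    simp only [Bool.not_eq_eq_eq_not, Bool.not_true] at hx ⊢
    by_cases hxc : x = cur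
    · subst hxc
      rw [PySem.Dict.contains_eq_isSome_get?, PySem.Dict.get?_insert_self] at hx
      exact absurd hx (by simp)
    · rwa [PySem.Dict.contains_eq_isSome_get?, PySem.Dict.get?_insert_of_ne _ _ hxc,
        ← PySem.Dict.contains_eq_isSome_get?] at hx

-- Source B's outer loop: state (max_depth, memo); phase 2 unwinds the (possibly truncated) path.
def compute_max_depth_py_alt (nodes : List (String × Int)) (edges : List (String × List (String × String))) (backbone_nodes : List String) : Int :=
  let pm := pvPmB edges
  (nodes.foldl (fun st p =>
      let r := pvWalkB backbone_nodes pm st.2 PySem.Dict.empty [] p.1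
      let u := r.2.1.reverse.foldl (fun dm n => (dm.1 + 1, dm.2.insert n (dm.1 + 1))) (r.1, r.2.2)
      (if u.1 > st.1 then u.1 else st.1, u.2))
    ((0 : Int), (PySem.Dict.empty : PySem.Dict String Int))).1

-- ===== PRECONDITION & SPEC =====
def Spec_compute_max_depth_py (nodes : List (String × Int)) (edges : List (String × List (String × String))) (backbone_nodes : List String) (out : Int) : Prop := out = compute_max_depth_py_alt nodes edges backbone_nodes
instance (nodes : List (String × Int)) (edges : List (String × List (String × String))) (backbone_nodes : List String) (out : Int) : Decidable (Spec_compute_max_depth_py nodes edges backbone_nodes out) := by unfold Spec_compute_max_depth_py; infer_instance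

-- ===== CLAIM (what is proved, stated in full; the proofs are below) =====
def Claim_equal_compute_max_depth_py : Prop := ∀ (nodes : List (String × Int)) (edges : List (String × List (String × String))) (backbone_nodes : List String), Dom_compute_max_depth_py nodes edges backbone_nodes → Spec_compute_max_depth_py nodes edges backbone_nodes (compute_max_depth_py nodes edges backbone_nodes)

-- ===== LEMMAS AND PROOFS =====

-- The truthy parent of a node: some p iff parent_map.get(cur) is a non-empty string.
def pvPar (pm : PySem.Dict String String) (c : String) : Option String :=
  match pm.get? c with
  | some p => if p = "" then none else some p
  | none => none

-- "cur" passes the walk's backbone test.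
abbrev pvOk (bb : List String) (c : String) : Prop := c ≠ "" ∧ c ∉ bb

-- Reference walk (proof-side model): follow truthy parents, collecting the nodes stepped
-- from, stopping on backbone/empty node, revisit, or missing parent.
def pvRun (bb : List String) (pm : PySem.Dict String String)
    (p : List String) (c : String) : List String × String :=
  if h : pvOk bb c ∧ c ∉ p ∧ (pvPar pm c).isSome then
    pvRun bb pm (p ++ [c]) ((pvPar pm c).get h.2.2)
  else (p, c)
termination_by (pm.keys.filter (fun k => !(p.contains k))).length
decreasing_by
  apply pvFilterLt (c := c)
  · refine (PySem.Dict.contains_iff_mem_keys pm c).mp ?_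
    rw [PySem.Dict.contains_eq_isSome_get?]
    rcases h with ⟨-, -, hs⟩
    unfold pvPar at hs
    cases hg : pm.get? c with
    | none => rw [hg] at hs; simp at hs
    | some p => rfl
  · simpa using h.2.1
  · simp
  · intro x hx
    simp only [Bool.not_eq_eq_eq_not, Bool.not_true, List.contains_eq_mem,
      decide_eq_false_iff_not, List.mem_append, List.mem_singleton] at hx ⊢
    exact fun hmem => hx (Or.inl hmem)

-- A's per-node answer in the model: the number of steps of the walk from scratch.
def pvS (bb : List String) (pm : PySem.Dict String String) (c : String) : Int :=
  ((pvRun bb pm [] c).1.length : Int)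

-- q is the chain of nodes stepped from, walking from c; t is where the walk arrives.
def pvChain (pm : PySem.Dict String String) : String → List String → String → Prop
  | c, [], t => c = t
  | c, x :: xs, t => x = c ∧ ∃ y, pvPar pm x = some y ∧ pvChain pm y xs t

-- memo invariant: every entry is the true walk depth, and the walk from a memoized node
-- only steps from memoized nodes.
def pvInv (bb : List String) (pm : PySem.Dict String String)
    (memo : PySem.Dict String Int) : Prop :=
  ∀ n v, memo.get? n = some v → v = pvS bb pm n ∧
    ∀ x ∈ (pvRun bb pm [] n).1, (memo.get? x).isSome

theorem pvWalkA_eq_step (bb : List String) (pm : PySem.Dict String String)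
    (visited : PySem.Set String) (depth : Int) (cur p' : String)
    (h : cur ≠ "" ∧ cur ∉ bb ∧ cur ∉ visited) (hpm : pm.get? cur = some p') (hp : p' ≠ "") :
    pvWalkA bb pm visited depth cur
      = pvWalkA bb pm (PySem.Set.add visited cur) (depth + 1) p' := by
  rw [pvWalkA, dif_pos h]
  split
  · next p'' heq =>
      rw [hpm] at heq
      cases heq
      rw [if_pos hp]
  · next heq => rw [hpm] at heq; cases heq

theorem pvWalkA_eq_stop_basic (bb : List String) (pm : PySem.Dict String String)
    (visited : PySem.Set String) (depth : Int) (cur : String)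
    (h : ¬ (cur ≠ "" ∧ cur ∉ bb ∧ cur ∉ visited)) :
    pvWalkA bb pm visited depth cur = depth := by
  rw [pvWalkA, dif_neg h]

theorem pvWalkA_eq_stop_empty (bb : List String) (pm : PySem.Dict String String)
    (visited : PySem.Set String) (depth : Int) (cur p' : String)
    (h : cur ≠ "" ∧ cur ∉ bb ∧ cur ∉ visited) (hpm : pm.get? cur = some p') (hp : ¬ p' ≠ "") :
    pvWalkA bb pm visited depth cur = depth := by
  rw [pvWalkA, dif_pos h]
  split
  · next p'' heq =>
      rw [hpm] at heq
      cases heq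
      rw [if_neg hp]
  · next heq => rw [hpm] at heq

theorem pvWalkA_eq_stop_none (bb : List String) (pm : PySem.Dict String String)
    (visited : PySem.Set String) (depth : Int) (cur : String)
    (h : cur ≠ "" ∧ cur ∉ bb ∧ cur ∉ visited) (hpm : pm.get? cur = none) :
    pvWalkA bb pm visited depth cur = depth := by
  rw [pvWalkA, dif_pos h]
  split
  · next p'' heq => rw [hpm] at heq; cases heq
  · next heq => rfl

theorem pvWalkB_eq_bb (bb : List String) (pm : PySem.Dict String String)
    (memo pos : PySem.Dict String Int) (path : List String) (cur : String)
    (h : cur = "" ∨ cur ∈ bb) :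
    pvWalkB bb pm memo pos path cur = (0, path, memo) := by
  rw [pvWalkB, if_pos h]

theorem pvWalkB_eq_memo (bb : List String) (pm : PySem.Dict String String)
    (memo pos : PySem.Dict String Int) (path : List String) (cur : String) (b : Int)
    (h : ¬ (cur = "" ∨ cur ∈ bb)) (hm : memo.get? cur = some b) :
    pvWalkB bb pm memo pos path cur = (b, path, memo) := by
  rw [pvWalkB, if_neg h]
  split
  · next b' heq => rw [hm] at heq; cases heq; rfl
  · next heq => simp [hm] at heq

theorem pvWalkB_eq_cycle (bb : List String) (pm : PySem.Dict String String)
    (memo pos : PySem.Dict String Int) (path : List String) (cur : String) (i : Int)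
    (h : ¬ (cur = "" ∨ cur ∈ bb)) (hm : memo.get? cur = none) (hpos : pos.get? cur = some i) :
    pvWalkB bb pm memo pos path cur
      = ((path.length : Int) - i, PySem.List.slice path none (some i),
          (PySem.List.slice path (some i) none).foldl
            (fun m n => m.insert n ((path.length : Int) - i)) memo) := by
  rw [pvWalkB, if_neg h]
  split
  · next b' heq => simp [hm] at heq
  · next heq =>
      split
      · next i' heq2 => rw [hpos] at heq2; cases heq2; rfl
      · next heq2 => simp [hpos] at heq2

theorem pvWalkB_eq_step (bb : List String) (pm : PySem.Dict String String)
    (memo pos : PySem.Dict String Int) (path : List String) (cur p' : String)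
    (h : ¬ (cur = "" ∨ cur ∈ bb)) (hm : memo.get? cur = none) (hpos : pos.get? cur = none)
    (hpm : pm.get? cur = some p') (hp : p' ≠ "") :
    pvWalkB bb pm memo pos path cur
      = pvWalkB bb pm memo (pos.insert cur (path.length : Int)) (path ++ [cur]) p' := by
  rw [pvWalkB, if_neg h]
  split
  · next b' heq => rw [hm] at heq; cases heq
  · next heq =>
      split
      · next i' heq2 => rw [hpos] at heq2; cases heq2
      · next heq2 =>
          split
          · next p'' heq3 =>
              rw [hpm] at heq3
              cases heq3
              rw [if_pos hp]
          · next heq3 => rw [hpm] at heq3; cases heq3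

theorem pvWalkB_eq_empty (bb : List String) (pm : PySem.Dict String String)
    (memo pos : PySem.Dict String Int) (path : List String) (cur p' : String)
    (h : ¬ (cur = "" ∨ cur ∈ bb)) (hm : memo.get? cur = none) (hpos : pos.get? cur = none)
    (hpm : pm.get? cur = some p') (hp : ¬ p' ≠ "") :
    pvWalkB bb pm memo pos path cur = (0, path, memo.insert cur 0) := by
  rw [pvWalkB, if_neg h]
  split
  · next b' heq => rw [hm] at heq; cases heq
  · next heq =>
      split
      · next i' heq2 => rw [hpos] at heq2; cases heq2
      · next heq2 =>
          split
          · next p'' heq3 =>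
              rw [hpm] at heq3
              cases heq3
              rw [if_neg hp]
          · next heq3 => rw [hpm] at heq3

theorem pvWalkB_eq_none (bb : List String) (pm : PySem.Dict String String)
    (memo pos : PySem.Dict String Int) (path : List String) (cur : String)
    (h : ¬ (cur = "" ∨ cur ∈ bb)) (hm : memo.get? cur = none) (hpos : pos.get? cur = none)
    (hpm : pm.get? cur = none) :
    pvWalkB bb pm memo pos path cur = (0, path, memo.insert cur 0) := by
  rw [pvWalkB, if_neg h]
  split
  · next b' heq => rw [hm] at heq; cases heq
  · next heq =>
      split
      · next i' heq2 => rw [hpos] at heq2; cases heq2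
      · next heq2 =>
          split
          · next p'' heq3 => rw [hpm] at heq3; cases heq3
          · next heq3 => rfl

theorem pvRun_prefix (bb : List String) (pm : PySem.Dict String String)
    (p : List String) (c : String) : p <+: (pvRun bb pm p c).1 := by
  induction p, c using pvRun.induct bb pm with
  | case1 p c h ih =>
      rw [pvRun, dif_pos h]
      exact (List.prefix_append p [c]).trans ih
  | case2 p c h =>
      rw [pvRun, dif_neg h]

theorem pvRun_main (bb : List String) (pm : PySem.Dict String String)
    (p : List String) (c : String) :
    ∃ q t, pvRun bb pm p c = (p ++ q, t) ∧ pvChain pm c q t ∧ q.Nodup ∧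
      (∀ x ∈ q, pvOk bb x ∧ x ∉ p) ∧
      (¬ pvOk bb t ∨ t ∈ p ++ q ∨ pvPar pm t = none) := by
  induction p, c using pvRun.induct bb pm with
  | case1 p c h ih =>
      obtain ⟨q', t, heq, hch, hnd, hfr, hstop⟩ := ih
      refine ⟨c :: q', t, ?_, ?_, ?_, ?_, ?_⟩
      · rw [pvRun, dif_pos h, heq]; simp
      · exact ⟨rfl, (pvPar pm c).get h.2.2, (Option.some_get h.2.2).symm, hch⟩
      · exact List.nodup_cons.mpr ⟨fun hc => (hfr c hc).2 (by simp), hnd⟩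
      · intro x hx
        rcases List.mem_cons.mp hx with rfl | hx'
        · exact ⟨h.1, h.2.1⟩
        · exact ⟨(hfr x hx').1, fun hp => (hfr x hx').2 (by simp [hp])⟩
      · rcases hstop with h1 | h2 | h3
        · exact Or.inl h1
        · refine Or.inr (Or.inl ?_)
          simpa [List.append_assoc] using h2
        · exact Or.inr (Or.inr h3)
  | case2 p c h =>
      refine ⟨[], c, ?_, rfl, List.nodup_nil, by simp, ?_⟩
      · rw [pvRun, dif_neg h]; simp
      · by_cases hok : pvOk bb c
        · by_cases hp : c ∈ p
          · exact Or.inr (Or.inl (by simpa using hp))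
          · refine Or.inr (Or.inr ?_)
            by_cases hs : (pvPar pm c).isSome
            · exact absurd ⟨hok, hp, hs⟩ h
            · exact Option.not_isSome_iff_eq_none.mp hs
        · exact Or.inl hok

theorem pvChain_append (pm : PySem.Dict String String) (q1 q2 : List String)
    (c t : String) :
    pvChain pm c (q1 ++ q2) t ↔ ∃ m, pvChain pm c q1 m ∧ pvChain pm m q2 t := by
  induction q1 generalizing c with
  | nil =>
      constructor
      · exact fun h => ⟨c, rfl, h⟩
      · rintro ⟨m, rfl, h⟩; exact h
  | cons x xs ih =>
      constructor
      · rintro ⟨rfl, y, hy, hch⟩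
        obtain ⟨m, h1, h2⟩ := (ih y).mp hch
        exact ⟨m, ⟨rfl, y, hy, h1⟩, h2⟩
      · rintro ⟨m, ⟨rfl, y, hy, h1⟩, h2⟩
        exact ⟨rfl, y, hy, (ih y).mpr ⟨m, h1, h2⟩⟩

theorem pvChain_elem_par (pm : PySem.Dict String String) {c t : String} {q : List String}
    (h : pvChain pm c q t) : ∀ x ∈ q, (pvPar pm x).isSome := by
  induction q generalizing c with
  | nil => simp
  | cons a l ih =>
      obtain ⟨rfl, y, hy, hch⟩ := h
      intro x hx
      rcases List.mem_cons.mp hx with rfl | hx'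
      · rw [hy]; rfl
      · exact ih hch x hx' 

theorem pvChain_split (pm : PySem.Dict String String) {c t : String} {q : List String}
    (h : pvChain pm c q t) (k : Nat) (hk : k < q.length) :
    pvChain pm c (q.take k) q[k] ∧ pvChain pm q[k] (q.drop k) t := by
  have hsplit : pvChain pm c (q.take k ++ q.drop k) t := by
    rw [List.take_append_drop]; exact h
  obtain ⟨m, h1, h2⟩ := (pvChain_append pm _ _ _ _).mp hsplit
  have hdk : q.drop k = q[k] :: q.drop (k + 1) := List.drop_eq_getElem_cons hk
  rw [hdk] at h2
  have hm : q[k] = m := h2.1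
  subst hm
  rw [← hdk] at h2
  exact ⟨h1, h2⟩

theorem pvRun_through (bb : List String) (pm : PySem.Dict String String)
    {c t : String} {q : List String} (hch : pvChain pm c q t)
    (hok : ∀ x ∈ q, pvOk bb x) (hnd : q.Nodup) :
    ∀ p : List String, (∀ x ∈ q, x ∉ p) → pvRun bb pm p c = pvRun bb pm (p ++ q) t := by
  induction q generalizing c with
  | nil =>
      intro p _
      cases hch
      simp
  | cons x xs ih =>
      intro p hfr
      obtain ⟨rfl, y, hy, hch'⟩ := hch
      have hnd' : xs.Nodup := (List.nodup_cons.mp hnd).2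
      have hcxs : x ∉ xs := (List.nodup_cons.mp hnd).1
      have hok' : ∀ z ∈ xs, pvOk bb z := fun z hz => hok z (List.mem_cons_of_mem _ hz)
      have hsome : (pvPar pm x).isSome := by rw [hy]; rfl
      rw [pvRun, dif_pos ⟨hok x List.mem_cons_self, hfr x List.mem_cons_self, hsome⟩]
      have hget : (pvPar pm x).get hsome = y := by simp [hy]
      rw [hget]
      rw [ih hch' hok' hnd' (p ++ [x]) ?_]
      · rw [List.append_assoc]; rfl
      · intro z hz hmem
        rcases List.mem_append.mp hmem with hzp | hzx
        · exact hfr z (List.mem_cons_of_mem _ hz) hzp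
        · have hzx' : z = x := by simpa using hzx
          exact hcxs (hzx' ▸ hz)

theorem pvRun_shift (bb : List String) (pm : PySem.Dict String String)
    (ctx : List String) (q : List String) (c : String)
    (h1 : ∀ x ∈ (pvRun bb pm q c).1, x ∈ q ∨ x ∉ ctx)
    (h2 : (pvRun bb pm q c).2 ∉ ctx) :
    pvRun bb pm (ctx ++ q) c = (ctx ++ (pvRun bb pm q c).1, (pvRun bb pm q c).2) := by
  revert h1 h2
  induction q, c using pvRun.induct bb pm with
  | case1 q c h ih =>
      intro h1 h2
      have heq : pvRun bb pm q c = pvRun bb pm (q ++ [c]) ((pvPar pm c).get h.2.2) := by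
        rw [pvRun, dif_pos h]
      rw [heq] at h1 h2 ⊢
      have hcmem : c ∈ (pvRun bb pm (q ++ [c]) ((pvPar pm c).get h.2.2)).1 :=
        (pvRun_prefix bb pm (q ++ [c]) _).subset (by simp)
      have hcctx : c ∉ ctx := by
        rcases h1 c hcmem with hq | hc
        · exact absurd hq h.2.1
        · exact hc
      have hcond : pvOk bb c ∧ c ∉ ctx ++ q ∧ (pvPar pm c).isSome := by
        refine ⟨h.1, ?_, h.2.2⟩
        intro hm
        rcases List.mem_append.mp hm with hm | hm
        · exact hcctx hm
        · exact h.2.1 hm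
      rw [pvRun, dif_pos hcond]
      rw [show (ctx ++ q) ++ [c] = ctx ++ (q ++ [c]) from by rw [List.append_assoc]]
      exact ih (fun x hx => (h1 x hx).imp_left (fun hq => List.mem_append.mpr (Or.inl hq))) h2
  | case2 q c h =>
      intro h1 h2
      have heq : pvRun bb pm q c = (q, c) := by rw [pvRun, dif_neg h]
      rw [heq] at h1 h2 ⊢
      rw [pvRun, dif_neg ?_]
      intro ⟨hok, hnm, hsome⟩
      refine h ⟨hok, ?_, hsome⟩
      intro hq
      exact hnm (List.mem_append.mpr (Or.inr hq))

-- run from scratch along a complete chain that ends for a context-free reason.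
theorem pvRun_of_chain_stop (bb : List String) (pm : PySem.Dict String String)
    {c t : String} {q : List String} (hch : pvChain pm c q t)
    (hok : ∀ x ∈ q, pvOk bb x) (hnd : q.Nodup)
    (hstop : ¬ pvOk bb t ∨ t ∈ q ∨ pvPar pm t = none) :
    pvRun bb pm [] c = (q, t) := by
  have h1 := pvRun_through bb pm hch hok hnd [] (by simp)
  rw [h1]
  rw [pvRun, dif_neg ?_]
  · simp
  · intro ⟨hokt, hnm, hsome⟩
    rcases hstop with hs | hs | hs
    · exact hs hokt
    · exact hnm (by simpa using hs)
    · rw [hs] at hsome; exact absurd hsome (by simp)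

-- run from scratch along a chain into a node whose own walk avoids the chain.
theorem pvRun_compose (bb : List String) (pm : PySem.Dict String String)
    {c t : String} {q : List String} (hch : pvChain pm c q t)
    (hok : ∀ x ∈ q, pvOk bb x) (hnd : q.Nodup)
    (hdisj : ∀ x ∈ (pvRun bb pm [] t).1, x ∉ q)
    (hstop : (pvRun bb pm [] t).2 ∉ q) :
    pvRun bb pm [] c = (q ++ (pvRun bb pm [] t).1, (pvRun bb pm [] t).2) := by
  have h1 := pvRun_through bb pm hch hok hnd [] (by simp)
  rw [h1]
  have h2 := pvRun_shift bb pm q [] t (fun x hx => Or.inr (hdisj x hx)) hstop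
  simpa using h2

theorem pvGetFoldInsertConst (l : List String) (v : Int) (m : PySem.Dict String Int)
    (x : String) :
    ((l.foldl (fun m n => m.insert n v) m).get? x) = if x ∈ l then some v else m.get? x := by
  induction l generalizing m with
  | nil => simp
  | cons a l ih =>
      rw [List.foldl_cons, ih]
      by_cases hl : x ∈ l
      · simp [hl]
      · by_cases ha : x = a
        · subst ha
          simp [hl, PySem.Dict.get?_insert_self]
        · simp [hl, ha, PySem.Dict.get?_insert_of_ne _ _ ha]

theorem pvUnwind (l : List String) (b : Int) (m : PySem.Dict String Int) :
    (l.reverse.foldl (fun dm n => (dm.1 + 1, dm.2.insert n (dm.1 + 1))) (b, m)).1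
        = b + (l.length : Int) ∧
    ∀ x, ((l.reverse.foldl (fun dm n => (dm.1 + 1, dm.2.insert n (dm.1 + 1))) (b, m)).2).get? x
        = match PySem.List.index? l x with
          | some k => some (b + ((l.length - k : Nat) : Int))
          | none => m.get? x := by
  induction l generalizing b with
  | nil => simp
  | cons a rest ih =>
      have hrev : (a :: rest).reverse = rest.reverse ++ [a] := by simp
      rw [hrev, List.foldl_append]
      obtain ⟨ih1, ih2⟩ := ih b
      constructor
      · rw [List.foldl_cons, List.foldl_nil, ih1]
        simp only [List.length_cons]
        push_cast
        ring
      · intro x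
        rw [List.foldl_cons, List.foldl_nil]
        by_cases hxa : x = a
        · subst hxa
          rw [PySem.Dict.get?_insert_self, PySem.List.index?_cons_self, ih1]
          simp only [List.length_cons, Nat.sub_zero]
          congr 1
          push_cast
          ring
        · rw [PySem.Dict.get?_insert_of_ne _ _ hxa, ih2 x,
            PySem.List.index?_cons_of_ne _ (fun h => hxa h.symm)]
          cases hidx : PySem.List.index? rest x with
          | none => simp
          | some k =>
              simp only [Option.map_some]
              have : (a :: rest).length - (k + 1) = rest.length - k := by
                simp [Nat.succ_sub_succ]
              simp

-- the walk from any path position, when the walk out of `cur` ends for a reason valid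
-- without any context (not-ok or no parent).
theorem pvRun_drop_of_stop (bb : List String) (pm : PySem.Dict String String)
    {c₀ cur : String} {path : List String} (hch : pvChain pm c₀ path cur)
    (hok : ∀ x ∈ path, pvOk bb x) (hnd : path.Nodup)
    (hstop : ¬ pvOk bb cur ∨ pvPar pm cur = none) :
    ∀ k (hk : k < path.length), pvRun bb pm [] path[k] = (path.drop k, cur) := by
  intro k hk
  refine pvRun_of_chain_stop bb pm (pvChain_split pm hch k hk).2
    (fun x hx => hok x (List.mem_of_mem_drop hx)) (hnd.sublist (List.drop_sublist k path))
    (hstop.imp_right Or.inr)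

theorem pvRun_whole_of_stop (bb : List String) (pm : PySem.Dict String String)
    {c₀ cur : String} {path : List String} (hch : pvChain pm c₀ path cur)
    (hok : ∀ x ∈ path, pvOk bb x) (hnd : path.Nodup)
    (hstop : ¬ pvOk bb cur ∨ cur ∈ path ∨ pvPar pm cur = none) :
    pvRun bb pm [] c₀ = (path, cur) :=
  pvRun_of_chain_stop bb pm hch hok hnd hstop

-- the walk from a tail position when the whole walk closed a cycle at index j.
theorem pvRun_drop_of_cycle (bb : List String) (pm : PySem.Dict String String)
    {c₀ cur : String} {path : List String} (hch : pvChain pm c₀ path cur)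
    (hok : ∀ x ∈ path, pvOk bb x) (hnd : path.Nodup)
    {j : Nat} (hj : j < path.length) (hcur : path[j] = cur) :
    ∀ k (hk : k < path.length), k ≤ j → pvRun bb pm [] path[k] = (path.drop k, cur) := by
  intro k hk hkj
  refine pvRun_of_chain_stop bb pm (pvChain_split pm hch k hk).2
    (fun x hx => hok x (List.mem_of_mem_drop hx)) (hnd.sublist (List.drop_sublist k path))
    (Or.inr (Or.inl ?_))
  rw [← hcur]
  have h1 : (path.drop k)[j - k]'(by rw [List.length_drop]; omega) = path[j] := by
    rw [List.getElem_drop]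
    exact getElem_congr rfl (Nat.add_sub_cancel' hkj) (by omega)
  rw [← h1]
  exact List.getElem_mem _

-- the walk from a cycle position: around the cycle and back to itself.
theorem pvRun_rot (bb : List String) (pm : PySem.Dict String String)
    {c₀ cur : String} {path : List String} (hch : pvChain pm c₀ path cur)
    (hok : ∀ x ∈ path, pvOk bb x) (hnd : path.Nodup)
    {j : Nat} (hj : j < path.length) (hcur : path[j] = cur) :
    ∀ m (hm : m < path.length), j ≤ m →
      pvRun bb pm [] path[m] = (path.drop m ++ (path.take m).drop j, path[m]) := by
  intro m hm hjm
  have hchain1 : pvChain pm path[m] (path.drop m) cur := (pvChain_split pm hch m hm).2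
  have hchain2 : pvChain pm cur ((path.take m).drop j) path[m] := by
    rcases Nat.lt_or_ge j m with hlt | hge
    · have htk : pvChain pm c₀ (path.take m) path[m] := (pvChain_split pm hch m hm).1
      have hjt : j < (path.take m).length := by
        rw [List.length_take]
        omega
      have := (pvChain_split pm htk j hjt).2
      have hgt : (path.take m)[j] = path[j] := List.getElem_take
      rw [hgt, hcur] at this
      exact this
    · have hjeq : j = m := le_antisymm hjm hge
      subst hjeq
      have : (path.take j).drop j = [] := by
        apply List.drop_eq_nil_of_le
        rw [List.length_take]
        omega
      rw [this]
      show cur = path[j]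
      exact hcur.symm
  have hchain : pvChain pm path[m] (path.drop m ++ (path.take m).drop j) path[m] :=
    (pvChain_append pm _ _ _ _).mpr ⟨cur, hchain1, hchain2⟩
  have hnd2 : (path.take m ++ path.drop m).Nodup := by
    rw [List.take_append_drop]; exact hnd
  have hdisj0 := List.disjoint_of_nodup_append hnd2
  have hdisj : ∀ x ∈ path.drop m, x ∉ (path.take m).drop j := by
    intro x hx hx'
    exact hdisj0 (List.mem_of_mem_drop hx') hx
  have hndrot : (path.drop m ++ (path.take m).drop j).Nodup := by
    refine List.Nodup.append (hnd.sublist (List.drop_sublist m path))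
      ((hnd.sublist (List.take_sublist m path)).sublist (List.drop_sublist j _)) ?_
    intro x hx hx'
    exact hdisj x hx hx'
  have hokrot : ∀ x ∈ path.drop m ++ (path.take m).drop j, pvOk bb x := by
    intro x hx
    rcases List.mem_append.mp hx with hx | hx
    · exact hok x (List.mem_of_mem_drop hx)
    · exact hok x (List.mem_of_mem_take (List.mem_of_mem_drop hx))
  refine pvRun_of_chain_stop bb pm hchain hokrot hndrot (Or.inr (Or.inl ?_))
  refine List.mem_append.mpr (Or.inl ?_)
  have : (path.drop m)[0]'(by rw [List.length_drop]; omega) = path[m] := by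
    rw [List.getElem_drop]
    exact getElem_congr rfl (Nat.add_zero m) (by omega)
  rw [← this]
  exact List.getElem_mem _

-- membership in a drop splits at any index j.
theorem pvMemSplit (path : List String) (j : Nat) {x : String} {k : Nat}
    (hx : x ∈ path.drop k) : x ∈ path.take j ∨ x ∈ path.drop j := by
  obtain ⟨b, hb, hbx⟩ := List.mem_iff_getElem.mp hx
  rw [List.getElem_drop] at hbx
  have hb' : k + b < path.length := by
    rw [List.length_drop] at hb; omega
  by_cases hlt : k + b < j
  · left
    rw [List.mem_iff_getElem]
    refine ⟨k + b, by rw [List.length_take]; omega, ?_⟩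
    rw [List.getElem_take]
    exact hbx
  · right
    rw [List.mem_iff_getElem]
    refine ⟨k + b - j, by rw [List.length_drop]; omega, ?_⟩
    rw [List.getElem_drop, ← hbx]
    exact getElem_congr rfl (by omega) (by omega)

theorem pvMemDropLe (path : List String) {j k : Nat} (hjk : j ≤ k) {x : String}
    (hx : x ∈ path.drop k) : x ∈ path.drop j := by
  have : path.drop k = (path.drop j).drop (k - j) := by
    rw [List.drop_drop]
    congr 1
    omega
  rw [this] at hx
  exact List.mem_of_mem_drop hx

theorem pvMemTakeDrop (path : List String) {m j : Nat} {x : String}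
    (hx : x ∈ (path.take m).drop j) : x ∈ path.drop j := by
  obtain ⟨b, hb, hbx⟩ := List.mem_iff_getElem.mp hx
  rw [List.getElem_drop, List.getElem_take] at hbx
  have hblen : j + b < path.length := by
    rw [List.length_drop, List.length_take] at hb
    omega
  rw [List.mem_iff_getElem]
  refine ⟨b, by rw [List.length_drop]; rw [List.length_drop, List.length_take] at hb; omega, ?_⟩
  rw [List.getElem_drop]
  exact hbx

-- shared conclusion for the two no-parent leaves of the phase-1 loop.
theorem pvWalkB_terminal (bb : List String) (pm : PySem.Dict String String)
    (memo pos : PySem.Dict String Int) (path : List String) (cur : String) (c₀ : String)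
    (hInv : pvInv bb pm memo)
    (hpos : ∀ x, pos.get? x = (PySem.List.index? path x).map (fun n => (n : Int)))
    (hnd : path.Nodup) (hok : ∀ x ∈ path, pvOk bb x)
    (hmem : ∀ x ∈ path, memo.get? x = none) (hch : pvChain pm c₀ path cur)
    (hparn : pvPar pm cur = none) :
    path.Nodup ∧
    (0 : Int) + (path.length : Int) = pvS bb pm c₀ ∧
    (∀ k (hk : k < path.length),
        pvS bb pm (path[k]) = (0 : Int) + ((path.length - k : Nat) : Int)) ∧
    (∀ x ∈ path, (memo.insert cur 0).get? x = none) ∧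
    (∀ n v, (memo.insert cur 0).get? n = some v →
        v = pvS bb pm n ∧ ∀ x ∈ (pvRun bb pm [] n).1,
          ((memo.insert cur 0).get? x).isSome ∨ x ∈ path) ∧
    (∀ k (hk : k < path.length), ∀ x ∈ (pvRun bb pm [] (path[k])).1,
        ((memo.insert cur 0).get? x).isSome ∨ x ∈ path) := by
  have hcurnp : cur ∉ path := by
    intro hc
    have hps := pvChain_elem_par pm hch cur hc
    rw [hparn] at hps
    exact absurd hps (by simp)
  have hrunc : pvRun bb pm [] cur = ([], cur) := by
    rw [pvRun, dif_neg]
    intro ⟨h1, h2, h3⟩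
    rw [hparn] at h3
    exact absurd h3 (by simp)
  have hwhole := pvRun_whole_of_stop bb pm hch hok hnd (Or.inr (Or.inr hparn))
  have hdrop := pvRun_drop_of_stop bb pm hch hok hnd (Or.inr hparn)
  refine ⟨hnd, ?_, ?_, ?_, ?_, ?_⟩
  · unfold pvS
    rw [hwhole]
    simp
  · intro k hk
    unfold pvS
    rw [hdrop k hk]
    simp only [List.length_drop]
    omega
  · intro x hxp
    rw [PySem.Dict.get?_insert]
    have hne : ¬ x = cur := fun hxc => hcurnp (by rw [hxc] at hxp; exact hxp)
    rw [if_neg hne]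
    exact hmem x hxp
  · intro n v hv
    rw [PySem.Dict.get?_insert] at hv
    by_cases hnc : n = cur
    · subst hnc
      rw [if_pos rfl] at hv
      injection hv with hv
      constructor
      · rw [← hv]
        unfold pvS
        rw [hrunc]
        rfl
      · intro x hx
        rw [hrunc] at hx
        exact absurd hx (by simp)
    · rw [if_neg hnc] at hv
      obtain ⟨hval, hcl⟩ := hInv n v hv
      refine ⟨hval, fun x hx => Or.inl ?_⟩
      rw [PySem.Dict.get?_insert]
      by_cases hxc : x = cur
      · rw [if_pos hxc]; rfl
      · rw [if_neg hxc]; exact hcl x hx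
  · intro k hk x hx
    rw [hdrop k hk] at hx
    exact Or.inr (List.mem_of_mem_drop (by simpa using hx))

theorem pvWalkB_spec (bb : List String) (pm : PySem.Dict String String) :
    ∀ (memo pos : PySem.Dict String Int) (path : List String) (cur : String), ∀ c₀ : String,
    pvInv bb pm memo →
    (∀ x, pos.get? x = (PySem.List.index? path x).map (fun n => (n : Int))) →
    path.Nodup →
    (∀ x ∈ path, pvOk bb x) →
    (∀ x ∈ path, memo.get? x = none) →
    pvChain pm c₀ path cur →
    ((pvWalkB bb pm memo pos path cur).2.1.Nodup) ∧
    ((pvWalkB bb pm memo pos path cur).1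
        + ((pvWalkB bb pm memo pos path cur).2.1.length : Int) = pvS bb pm c₀) ∧
    (∀ k (hk : k < (pvWalkB bb pm memo pos path cur).2.1.length),
        pvS bb pm ((pvWalkB bb pm memo pos path cur).2.1[k])
          = (pvWalkB bb pm memo pos path cur).1
            + (((pvWalkB bb pm memo pos path cur).2.1.length - k : Nat) : Int)) ∧
    (∀ x ∈ (pvWalkB bb pm memo pos path cur).2.1,
        ((pvWalkB bb pm memo pos path cur).2.2).get? x = none) ∧
    (∀ n v, ((pvWalkB bb pm memo pos path cur).2.2).get? n = some v →
        v = pvS bb pm n ∧ ∀ x ∈ (pvRun bb pm [] n).1,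
          (((pvWalkB bb pm memo pos path cur).2.2).get? x).isSome
            ∨ x ∈ (pvWalkB bb pm memo pos path cur).2.1) ∧
    (∀ k (hk : k < (pvWalkB bb pm memo pos path cur).2.1.length),
        ∀ x ∈ (pvRun bb pm [] ((pvWalkB bb pm memo pos path cur).2.1[k])).1,
          (((pvWalkB bb pm memo pos path cur).2.2).get? x).isSome
            ∨ x ∈ (pvWalkB bb pm memo pos path cur).2.1) := by
  intro memo pos path cur
  induction pos, path, cur using pvWalkB.induct bb pm memo with
  | case1 pos path cur h =>
      intro c₀ hInv hpos hnd hok hmem hch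
      rw [pvWalkB_eq_bb bb pm memo pos path cur h]
      dsimp only
      have hnok : ¬ pvOk bb cur := by
        rcases h with h1 | h2
        · exact fun hk => hk.1 h1
        · exact fun hk => hk.2 h2
      have hwhole := pvRun_whole_of_stop bb pm hch hok hnd (Or.inl hnok)
      have hdrop := pvRun_drop_of_stop bb pm hch hok hnd (Or.inl hnok)
      refine ⟨hnd, ?_, ?_, hmem, ?_, ?_⟩
      · unfold pvS
        rw [hwhole]
        simp
      · intro k hk
        unfold pvS
        rw [hdrop k hk]
        simp only [List.length_drop]
        omega
      · intro n v hv
        obtain ⟨hval, hcl⟩ := hInv n v hv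
        exact ⟨hval, fun x hx => Or.inl (hcl x hx)⟩
      · intro k hk x hx
        rw [hdrop k hk] at hx
        exact Or.inr (List.mem_of_mem_drop (by simpa using hx))
  | case2 pos path cur h b hmemo =>
      intro c₀ hInv hpos hnd hok hmem hch
      rw [pvWalkB_eq_memo bb pm memo pos path cur b h hmemo]
      dsimp only
      obtain ⟨hbS, hclos⟩ := hInv cur b hmemo
      have hpar_path : ∀ x ∈ path, (pvPar pm x).isSome := pvChain_elem_par pm hch
      have hdisj : ∀ x ∈ (pvRun bb pm [] cur).1, x ∉ path := by
        intro x hx hxp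
        have hs := hclos x hx
        rw [hmem x hxp] at hs
        exact absurd hs (by simp)
      have hstop' : (pvRun bb pm [] cur).2 ∉ path := by
        obtain ⟨q, t, heq, hchq, hndq, hfrq, hstq⟩ := pvRun_main bb pm [] cur
        rw [heq]
        intro htp
        rcases hstq with hs | hs | hs
        · exact hs (hok t htp)
        · have hiss : (memo.get? t).isSome := hclos t (by rw [heq]; simpa using hs)
          rw [hmem t htp] at hiss
          exact absurd hiss (by simp)
        · have hps := hpar_path t htp
          rw [hs] at hps
          exact absurd hps (by simp)
      have hcomp : ∀ k (hk : k < path.length),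
          pvRun bb pm [] path[k]
            = (path.drop k ++ (pvRun bb pm [] cur).1, (pvRun bb pm [] cur).2) := by
        intro k hk
        exact pvRun_compose bb pm (pvChain_split pm hch k hk).2
          (fun x hx => hok x (List.mem_of_mem_drop hx)) (hnd.sublist (List.drop_sublist k path))
          (fun x hx hxd => hdisj x hx (List.mem_of_mem_drop hxd))
          (fun hxd => hstop' (List.mem_of_mem_drop hxd))
      have hwhole : pvRun bb pm [] c₀
          = (path ++ (pvRun bb pm [] cur).1, (pvRun bb pm [] cur).2) :=
        pvRun_compose bb pm hch hok hnd hdisj hstop'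
      have hbS' : b = ((pvRun bb pm [] cur).1.length : Int) := hbS
      refine ⟨hnd, ?_, ?_, hmem, ?_, ?_⟩
      · unfold pvS
        rw [hwhole]
        simp only [List.length_append]
        rw [hbS']
        push_cast
        ring
      · intro k hk
        unfold pvS
        rw [hcomp k hk]
        simp only [List.length_append, List.length_drop]
        rw [hbS']
        push_cast
        omega
      · intro n v hv
        obtain ⟨hval, hcl⟩ := hInv n v hv
        exact ⟨hval, fun x hx => Or.inl (hcl x hx)⟩
      · intro k hk x hx
        rw [hcomp k hk] at hx
        rcases List.mem_append.mp (by simpa using hx) with hx1 | hx2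
        · exact Or.inr (List.mem_of_mem_drop hx1)
        · exact Or.inl (hclos x hx2)
  | case3 pos path cur h hmemo i hposc =>
      intro c₀ hInv hpos hnd hok hmem hch
      have hposc' := hpos cur
      rw [hposc] at hposc'
      cases hidx : PySem.List.index? path cur with
      | none =>
          rw [hidx] at hposc'
          simp at hposc'
      | some j =>
          rw [hidx] at hposc'
          simp only [Option.map] at hposc'
          injection hposc' with hij
          subst hij
          obtain ⟨hjlt, hjeq, hfirst⟩ := PySem.List.getElem_of_index?_eq_some hidx
          rw [pvWalkB_eq_cycle bb pm memo pos path cur (j : Int) h hmemo hposc]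
          rw [PySem.List.slice_to_natCast, PySem.List.slice_from_natCast]
          dsimp only
          have htklen : (path.take j).length = j := by
            rw [List.length_take]
            omega
          have hwhole := pvRun_whole_of_stop bb pm hch hok hnd
            (Or.inr (Or.inl (by rw [← hjeq]; exact List.getElem_mem _)))
          have hdropc := pvRun_drop_of_cycle bb pm hch hok hnd hjlt hjeq
          have hrot := pvRun_rot bb pm hch hok hnd hjlt hjeq
          have hget' : ∀ x,
              ((path.drop j).foldl
                  (fun m n => m.insert n ((path.length : Int) - (j : Int))) memo).get? x
                = if x ∈ path.drop j then some ((path.length : Int) - (j : Int))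
                  else memo.get? x :=
            fun x => pvGetFoldInsertConst _ _ _ x
          have hrotmem : ∀ m (hm : m < path.length), j ≤ m →
              ∀ x ∈ path.drop m ++ (path.take m).drop j, x ∈ path.drop j := by
            intro m hm hjm x hx
            rcases List.mem_append.mp hx with hx1 | hx2
            · exact pvMemDropLe path hjm hx1
            · exact pvMemTakeDrop path hx2
          have hScyc : ∀ m (hm : m < path.length), j ≤ m →
              pvS bb pm (path[m]) = (path.length : Int) - (j : Int) := by
            intro m hm hjm
            unfold pvS
            rw [hrot m hm hjm]
            simp only [List.length_append, List.length_drop, List.length_take]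
            have hmin : min m path.length = m := by omega
            rw [hmin]
            omega
          have hmemdrop : ∀ x ∈ path.drop j, ∃ m, ∃ (hm : m < path.length),
              j ≤ m ∧ path[m] = x := by
            intro x hx
            obtain ⟨a, ha, hax⟩ := List.mem_iff_getElem.mp hx
            have ha' : a < path.length - j := by rw [List.length_drop] at ha; exact ha
            refine ⟨j + a, by omega, by omega, ?_⟩
            rw [← hax, List.getElem_drop]
          refine ⟨hnd.sublist (List.take_sublist j path), ?_, ?_, ?_, ?_, ?_⟩
          · unfold pvS
            rw [hwhole, htklen]
            dsimp only
            omega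
          · intro k hk
            rw [htklen] at hk
            have hkp : k < path.length := by omega
            have hgtk : (path.take j)[k]'(by rw [htklen]; exact hk) = path[k] :=
              List.getElem_take
            rw [hgtk]
            unfold pvS
            rw [hdropc k hkp (le_of_lt hk)]
            simp only [List.length_drop, htklen]
            omega
          · intro x hxtk
            rw [hget' x]
            have hxdj : x ∉ path.drop j := by
              intro hxd
              have hnd2 : (path.take j ++ path.drop j).Nodup := by
                rw [List.take_append_drop]; exact hnd
              exact List.disjoint_of_nodup_append hnd2 hxtk hxd
            rw [if_neg hxdj]
            exact hmem x (List.mem_of_mem_take hxtk)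
          · intro n v hv
            rw [hget' n] at hv
            by_cases hndj : n ∈ path.drop j
            · rw [if_pos hndj] at hv
              injection hv with hv
              obtain ⟨m, hm, hjm, hmx⟩ := hmemdrop n hndj
              constructor
              · rw [← hv, ← hmx]
                exact (hScyc m hm hjm).symm
              · intro x hx
                rw [← hmx] at hx
                rw [hrot m hm hjm] at hx
                have hxdj : x ∈ path.drop j := hrotmem m hm hjm x (by simpa using hx)
                left
                rw [hget' x, if_pos hxdj]
                rfl
            · rw [if_neg hndj] at hv
              obtain ⟨hval, hcl⟩ := hInv n v hv
              refine ⟨hval, fun x hx => Or.inl ?_⟩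
              rw [hget' x]
              by_cases hxdj : x ∈ path.drop j
              · rw [if_pos hxdj]; rfl
              · rw [if_neg hxdj]; exact hcl x hx
          · intro k hk x hx
            rw [htklen] at hk
            have hkp : k < path.length := by omega
            have hgtk : (path.take j)[k]'(by rw [htklen]; exact hk) = path[k] :=
              List.getElem_take
            rw [hgtk] at hx
            rw [hdropc k hkp (le_of_lt hk)] at hx
            rcases pvMemSplit path j (by simpa using hx) with hx1 | hx2
            · exact Or.inr hx1
            · left
              rw [hget' x, if_pos hx2]
              rfl
  | case4 pos path cur h hmemo hposc p' hpm hp ih =>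
      intro c₀ hInv hpos hnd hok hmem hch
      rw [pvWalkB_eq_step bb pm memo pos path cur p' h hmemo hposc hpm hp]
      have hcurnp : cur ∉ path := by
        have hpc := hpos cur
        rw [hposc] at hpc
        cases hidx : PySem.List.index? path cur with
        | none => exact (PySem.List.index?_eq_none_iff path cur).mp hidx
        | some j => rw [hidx] at hpc; simp at hpc
      have hokcur : pvOk bb cur := by
        rw [not_or] at h
        exact ⟨h.1, h.2⟩
      have hparc : pvPar pm cur = some p' := by
        unfold pvPar
        rw [hpm]
        simp [hp]
      refine ih c₀ hInv ?_ ?_ ?_ ?_ ?_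
      · intro x
        by_cases hxc : x = cur
        · subst hxc
          rw [PySem.Dict.get?_insert_self,
            PySem.List.index?_append_singleton_self path x hcurnp]
          rfl
        · rw [PySem.Dict.get?_insert_of_ne _ _ hxc, hpos x]
          by_cases hxp : x ∈ path
          · rw [PySem.List.index?_append_of_mem [cur] hxp]
          · have h1 : PySem.List.index? path x = none :=
              (PySem.List.index?_eq_none_iff path x).mpr hxp
            have h2 : PySem.List.index? (path ++ [cur]) x = none := by
              refine (PySem.List.index?_eq_none_iff _ x).mpr ?_
              intro hm
              rcases List.mem_append.mp hm with hm | hm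
              · exact hxp hm
              · exact hxc (by simpa using hm)
            rw [h1, h2]
      · refine List.Nodup.append hnd (List.nodup_singleton cur) ?_
        intro x hx hx'
        have hxc : x = cur := by simpa using hx'
        rw [hxc] at hx
        exact hcurnp hx
      · intro x hx
        rcases List.mem_append.mp hx with hx | hx
        · exact hok x hx
        · have hxc : x = cur := by simpa using hx
          exact hxc ▸ hokcur
      · intro x hx
        rcases List.mem_append.mp hx with hx | hx
        · exact hmem x hx
        · have hxc : x = cur := by simpa using hx
          exact hxc ▸ hmemo
      · exact (pvChain_append pm path [cur] c₀ p').mpr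
          ⟨cur, hch, ⟨rfl, p', hparc, rfl⟩⟩
  | case5 pos path cur h hmemo hposc p' hpm hp =>
      intro c₀ hInv hpos hnd hok hmem hch
      rw [pvWalkB_eq_empty bb pm memo pos path cur p' h hmemo hposc hpm hp]
      dsimp only
      have hparn : pvPar pm cur = none := by
        unfold pvPar
        simp only [ne_eq, not_not] at hp
        subst hp
        rw [hpm]
        simp
      exact pvWalkB_terminal bb pm memo pos path cur c₀ hInv hpos hnd hok hmem hch hparn
  | case6 pos path cur h hmemo hposc hpm =>
      intro c₀ hInv hpos hnd hok hmem hch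
      rw [pvWalkB_eq_none bb pm memo pos path cur h hmemo hposc hpm]
      dsimp only
      have hparn : pvPar pm cur = none := by
        unfold pvPar
        rw [hpm]
      exact pvWalkB_terminal bb pm memo pos path cur c₀ hInv hpos hnd hok hmem hch hparn

theorem pvFoldB (bb : List String) (pm : PySem.Dict String String) :
    ∀ (nodes : List (String × Int)) (md : Int) (memo : PySem.Dict String Int),
    pvInv bb pm memo →
    (nodes.foldl (fun st p =>
      let r := pvWalkB bb pm st.2 PySem.Dict.empty [] p.1
      let u := r.2.1.reverse.foldl (fun dm n => (dm.1 + 1, dm.2.insert n (dm.1 + 1))) (r.1, r.2.2)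
      (if u.1 > st.1 then u.1 else st.1, u.2)) (md, memo)).1
    = nodes.foldl (fun md p => max md (pvS bb pm p.1)) md := by
  intro nodes
  induction nodes with
  | nil => intro md memo hInv; rfl
  | cons nd rest ih =>
      intro md memo hInv
      rw [List.foldl_cons, List.foldl_cons]
      have hpos0 : ∀ x, (PySem.Dict.empty : PySem.Dict String Int).get? x
          = (PySem.List.index? ([] : List String) x).map (fun n => (n : Int)) := by
        intro x
        rw [PySem.Dict.get?_empty]
        rw [(PySem.List.index?_eq_none_iff ([] : List String) x).mpr (by simp)]
        rfl
      have hch0 : pvChain pm nd.1 [] nd.1 := rfl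
      obtain ⟨hnD, hC2, hC3, hfresh, hInv2, hC6⟩ :=
        pvWalkB_spec bb pm memo PySem.Dict.empty [] nd.1 nd.1 hInv hpos0 List.nodup_nil
          (by simp) (by simp) hch0
      obtain ⟨hu1, hu2⟩ := pvUnwind
        (pvWalkB bb pm memo PySem.Dict.empty [] nd.1).2.1
        (pvWalkB bb pm memo PySem.Dict.empty [] nd.1).1
        (pvWalkB bb pm memo PySem.Dict.empty [] nd.1).2.2
      have hlift : ∀ x,
          (((pvWalkB bb pm memo PySem.Dict.empty [] nd.1).2.2.get? x).isSome
            ∨ x ∈ (pvWalkB bb pm memo PySem.Dict.empty [] nd.1).2.1) →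
          (((pvWalkB bb pm memo PySem.Dict.empty [] nd.1).2.1.reverse.foldl
              (fun dm n => (dm.1 + 1, dm.2.insert n (dm.1 + 1)))
              ((pvWalkB bb pm memo PySem.Dict.empty [] nd.1).1,
               (pvWalkB bb pm memo PySem.Dict.empty [] nd.1).2.2)).2.get? x).isSome := by
        intro x hx
        rw [hu2 x]
        cases hidxx : PySem.List.index? (pvWalkB bb pm memo PySem.Dict.empty [] nd.1).2.1 x with
        | some k2 => rfl
        | none =>
            rcases hx with hi | hm2
            · exact hi
            · have hs := (PySem.List.index?_isSome_iff _ _).mpr hm2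
              rw [hidxx] at hs
              exact absurd hs (by simp)
      have hInv' : pvInv bb pm
          ((pvWalkB bb pm memo PySem.Dict.empty [] nd.1).2.1.reverse.foldl
            (fun dm n => (dm.1 + 1, dm.2.insert n (dm.1 + 1)))
            ((pvWalkB bb pm memo PySem.Dict.empty [] nd.1).1,
             (pvWalkB bb pm memo PySem.Dict.empty [] nd.1).2.2)).2 := by
        intro n v hv
        rw [hu2 n] at hv
        cases hidxn : PySem.List.index? (pvWalkB bb pm memo PySem.Dict.empty [] nd.1).2.1 n with
        | some k =>
            rw [hidxn] at hv
            injection hv with hv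
            obtain ⟨hk, hkn, -⟩ := PySem.List.getElem_of_index?_eq_some hidxn
            constructor
            · rw [← hv, ← hkn]
              exact (hC3 k hk).symm
            · intro x hx
              rw [← hkn] at hx
              exact hlift x (hC6 k hk x hx)
        | none =>
            rw [hidxn] at hv
            obtain ⟨hval, hcl⟩ := hInv2 n v hv
            exact ⟨hval, fun x hx => hlift x (hcl x hx)⟩
      have hd : ((pvWalkB bb pm memo PySem.Dict.empty [] nd.1).2.1.reverse.foldl
            (fun dm n => (dm.1 + 1, dm.2.insert n (dm.1 + 1)))
            ((pvWalkB bb pm memo PySem.Dict.empty [] nd.1).1,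
             (pvWalkB bb pm memo PySem.Dict.empty [] nd.1).2.2)).1 = pvS bb pm nd.1 :=
        hu1.trans hC2
      have hstep : (let r := pvWalkB bb pm (md, memo).2 PySem.Dict.empty [] nd.1
            let u := r.2.1.reverse.foldl (fun dm n => (dm.1 + 1, dm.2.insert n (dm.1 + 1)))
              (r.1, r.2.2)
            (if u.1 > (md, memo).1 then u.1 else (md, memo).1, u.2))
          = (max md (pvS bb pm nd.1),
             ((pvWalkB bb pm memo PySem.Dict.empty [] nd.1).2.1.reverse.foldl
                (fun dm n => (dm.1 + 1, dm.2.insert n (dm.1 + 1)))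
                ((pvWalkB bb pm memo PySem.Dict.empty [] nd.1).1,
                 (pvWalkB bb pm memo PySem.Dict.empty [] nd.1).2.2)).2) := by
        dsimp only
        rw [hd]
        congr 1
        by_cases hgt : pvS bb pm nd.1 > md
        · rw [if_pos hgt]
          exact (max_eq_right (le_of_lt hgt)).symm
        · rw [if_neg hgt]
          exact (max_eq_left (by omega)).symm
      rw [hstep]
      exact ih (max md (pvS bb pm nd.1)) _ hInv' 

theorem pvWalkA_run (bb : List String) (pm : PySem.Dict String String) :
    ∀ (visited : PySem.Set String) (depth : Int) (cur : String) (p : List String),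
    (∀ x, x ∈ visited ↔ x ∈ p) →
    pvWalkA bb pm visited depth cur
      = depth + (((pvRun bb pm p cur).1.length : Int) - (p.length : Int)) := by
  intro visited depth cur
  induction visited, depth, cur using pvWalkA.induct bb pm with
  | case1 visited depth cur h p' hpm hp ih =>
      intro p hiff
      have hpar : pvPar pm cur = some p' := by unfold pvPar; rw [hpm]; simp [hp]
      have hsome : (pvPar pm cur).isSome := by rw [hpar]; rfl
      have hcond : pvOk bb cur ∧ cur ∉ p ∧ (pvPar pm cur).isSome :=
        ⟨⟨h.1, h.2.1⟩, fun hm => h.2.2 ((hiff cur).mpr hm), hsome⟩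
      rw [pvWalkA_eq_step bb pm visited depth cur p' h hpm hp]
      rw [pvRun, dif_pos hcond]
      have hget : (pvPar pm cur).get hcond.2.2 = p' := by simp [hpar]
      rw [hget]
      rw [ih (p ++ [cur]) ?_]
      · simp only [List.length_append, List.length_cons, List.length_nil]
        push_cast
        ring
      · intro x
        rw [PySem.Set.mem_add]
        constructor
        · rintro (hx | rfl)
          · exact List.mem_append.mpr (Or.inl ((hiff x).mp hx))
          · exact List.mem_append.mpr (Or.inr (by simp))
        · intro hx
          rcases List.mem_append.mp hx with hx | hx
          · exact Or.inl ((hiff x).mpr hx)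
          · exact Or.inr (by simpa using hx)
  | case2 visited depth cur h p' hpm hp =>
      intro p hiff
      rw [pvWalkA_eq_stop_empty bb pm visited depth cur p' h hpm hp]
      rw [pvRun, dif_neg ?_]
      · simp
      · intro ⟨hok, hnp, hsome⟩
        have hnone : pvPar pm cur = none := by
          unfold pvPar
          simp only [ne_eq, not_not] at hp
          subst hp
          rw [hpm]
          simp
        rw [hnone] at hsome
        exact absurd hsome (by simp)
  | case3 visited depth cur h hpm =>
      intro p hiff
      rw [pvWalkA_eq_stop_none bb pm visited depth cur h hpm]
      rw [pvRun, dif_neg ?_]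
      · simp
      · intro ⟨hok, hnp, hsome⟩
        have hnone : pvPar pm cur = none := by unfold pvPar; rw [hpm]
        rw [hnone] at hsome
        exact absurd hsome (by simp)
  | case4 visited depth cur h =>
      intro p hiff
      rw [pvWalkA_eq_stop_basic bb pm visited depth cur h]
      rw [pvRun, dif_neg ?_]
      · simp
      · intro ⟨hok, hnp, hsome⟩
        exact h ⟨hok.1, hok.2, fun hv => hnp ((hiff cur).mp hv)⟩

theorem pvPm_eq (edges : List (String × List (String × String))) :
    pvPmB edges = pvPmA edges := by
  unfold pvPmA pvPmB
  rw [List.foldl_filter, List.foldl_map]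
  congr 1
  funext pm e
  by_cases hq : (PySem.Dict.mk e.2).get? "type" = some "SUB" <;> simp [hq]

-- ===== VERDICT (by name: the statement is the Claim_ definition above) =====
theorem compute_max_depth_py_spec : Claim_equal_compute_max_depth_py := by
  intro nodes edges bb _
  unfold Spec_compute_max_depth_py compute_max_depth_py compute_max_depth_py_alt
  rw [pvPm_eq]
  rw [pvFoldB bb (pvPmA edges) nodes 0 PySem.Dict.empty (by intro n v h; simp at h)]
  have hA : (fun (md : Int) (p : String × Int) =>
        max md (pvWalkA bb (pvPmA edges) PySem.Set.empty 0 p.1))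
      = (fun md p => max md (pvS bb (pvPmA edges) p.1)) := by
    funext md p
    rw [pvWalkA_run bb (pvPmA edges) PySem.Set.empty 0 p.1 []
      (by intro x; simp [PySem.Set.empty])]
    unfold pvS
    simp
  simp only [hA]
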